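-- pv_equiv track=rewrite | github.com/nvshah/problem-solving-cp | leetcode/DP/hard/maximum_values_of_k_coins_from_piles.py | maxValueOfCoins2
-- ===== SOURCE A (Python) =====
-- from typing import List
--
-- def maxValueOfCoins2(piles: List[List[int]], k: int) -> int:
--     '''DP - TLE (Not passed all cases)'''
--     N = len(piles)
--     dp = [0]*(k+1)
--
--     for i in range(N-1, -1, -1): # piles
--         pile = piles[i]
--         newDp = list(dp)
--         limit = len(pile)
--
--         for coins in range(1, k+1): # coins
--             val = dp[coins] # best val for pile-i & coins allowed to pick
--             curAmt = 0
--             for j in range(1, coins+1): # try diff combination with current pile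
--                 if j <= limit:
--                     curAmt += pile[j-1] # pick first j from cur-pile & rest from others
--                 val = max(val, curAmt + dp[coins-j])
--             newDp[j] = val
--
--         dp = newDp
--
--     return dp[k]
-- ===== SOURCE B (Python) =====
-- def maxValueOfCoins2(piles, k):
--     """Top-down memoized recursion over (pile index, remaining budget);
--     only reachable states are computed and j is capped at the pile length."""
--     memo = {}
--
--     def best(i, budget):
--         if i == len(piles):
--             return 0
--         key = (i, budget)
--         if key in memo:
--             return memo[key]
--         pile = piles[i]
--         res = best(i + 1, budget)  # take nothing from this pile
--         s = 0
--         for j in range(1, min(budget, len(pile)) + 1):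
--             s += pile[j - 1]
--             res = max(res, s + best(i + 1, budget - j))
--         memo[key] = res
--         return res
--
--     return best(0, k)
-- ===== Notes on version B (the rewrite author's own statement) =====
-- stated objective: alternative
-- what changed: B replaces A's bottom-up dp table over all N*k states by top-down memoized recursion on (pile index, remaining budget) with the per-pile choice capped at min(budget, pile length), so only reachable states are computed; the trade is Python recursion and dict overhead on large flat inputs.
import Mathlib
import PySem

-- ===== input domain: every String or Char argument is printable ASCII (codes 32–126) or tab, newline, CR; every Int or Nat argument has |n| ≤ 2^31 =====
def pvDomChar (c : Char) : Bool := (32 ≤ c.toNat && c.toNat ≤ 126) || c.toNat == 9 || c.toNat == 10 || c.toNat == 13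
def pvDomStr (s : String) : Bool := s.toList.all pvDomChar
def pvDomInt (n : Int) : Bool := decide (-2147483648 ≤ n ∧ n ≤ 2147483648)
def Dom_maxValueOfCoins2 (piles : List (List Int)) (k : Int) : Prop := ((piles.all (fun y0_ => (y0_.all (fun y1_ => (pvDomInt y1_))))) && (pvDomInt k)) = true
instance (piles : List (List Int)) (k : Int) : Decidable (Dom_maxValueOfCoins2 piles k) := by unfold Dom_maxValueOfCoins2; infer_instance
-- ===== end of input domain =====

-- B replaces A's bottom-up dp table by top-down memoized recursion on (pile index,
-- remaining budget) with the per-pile choice capped at min(budget, pile length):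
-- objective = alternative (only reachable states are computed).

-- ===== PORT A =====
-- inner 'for j in range(1, coins+1)' loop of A; state = (j, curAmt, val)
def pvInnerA (pile dp : List Int) (coins : Int) : Int × Int × Int :=
  (PySem.List.pyRange 1 (coins + 1) 1).foldl
    (fun s j =>
      let curAmt := if j ≤ PySem.List.len pile then s.2.1 + PySem.List.pyGetD pile (j - 1) 0 else s.2.1
      (j, curAmt, max s.2.2 (curAmt + PySem.List.pyGetD dp (coins - j) 0)))
    (0, 0, PySem.List.pyGetD dp coins 0)

def maxValueOfCoins2 (piles : List (List Int)) (k : Int) : Int :=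
  let N : Int := PySem.List.len piles
  let dp0 : List Int := PySem.List.pyRepeat [0] (k + 1)
  let dp :=
    (PySem.List.pyRange (N - 1) (-1) (-1)).foldl
      (fun dp i =>
        let pile := PySem.List.pyGetD piles i []
        (PySem.List.pyRange 1 (k + 1) 1).foldl
          (fun newDp coins =>
            let r := pvInnerA pile dp coins
            PySem.List.pySetD newDp r.1 r.2.2)   -- newDp[j] = val (j = last inner-loop index = coins)
          dp)
      dp0
  PySem.List.pyGetD dp k 0

-- ===== PORT B =====
-- B's inner function best(i, budget) threading the memo dict; the suffix list
-- 'rest' mirrors piles[i:] (the Python reads piles[i]), 'i' is kept for the memo key.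
mutual
def pvBest : List (List Int) → Int → Int → PySem.Dict (Int × Int) Int → Int × PySem.Dict (Int × Int) Int
  | [], _, _, memo => (0, memo)                          -- i == len(piles)
  | pile :: rest, i, budget, memo =>
    match memo.get? (i, budget) with                     -- if key in memo
    | some v => (v, memo)
    | none =>
      let p := pvBest rest (i + 1) budget memo           -- res = best(i+1, budget)
      let q := pvLoop rest (i + 1) pile budget
                 (PySem.List.pyRange 1 (min budget (PySem.List.len pile) + 1) 1) 0 p.1 p.2
      (q.1, q.2.insert (i, budget) q.1)                  -- memo[key] = res
termination_by rest _ _ _ => (rest.length + 1, 0)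

-- the 'for j in range(1, min(budget, len(pile)) + 1)' loop; state = (s, res, memo)
def pvLoop : List (List Int) → Int → List Int → Int → List Int → Int → Int → PySem.Dict (Int × Int) Int → Int × PySem.Dict (Int × Int) Int
  | _, _, _, _, [], _, res, memo => (res, memo)
  | rest, i1, pile, budget, j :: js, s, res, memo =>
    let s' := s + PySem.List.pyGetD pile (j - 1) 0       -- s += pile[j-1]
    let p := pvBest rest i1 (budget - j) memo
    pvLoop rest i1 pile budget js s' (max res (s' + p.1)) p.2
termination_by rest _ _ _ js _ _ _ => (rest.length + 1, js.length + 1)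
end

def maxValueOfCoins2_alt (piles : List (List Int)) (k : Int) : Int :=
  (pvBest piles 0 k PySem.Dict.empty).1

-- ===== PRECONDITION & SPEC =====
-- Pre_ excludes k < 0, where A raises IndexError (dp = [] and dp[k] with a negative index).
def Pre_maxValueOfCoins2 (_piles : List (List Int)) (k : Int) : Prop := 0 ≤ k
instance (piles : List (List Int)) (k : Int) : Decidable (Pre_maxValueOfCoins2 piles k) := by unfold Pre_maxValueOfCoins2; infer_instance
def pvWitness_maxValueOfCoins2 : List (List Int) × Int := ([[1, 100, 3], [7, 8, 9], [2]], 2)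

def Spec_maxValueOfCoins2 (piles : List (List Int)) (k : Int) (out : Int) : Prop := out = maxValueOfCoins2_alt piles k
instance (piles : List (List Int)) (k : Int) (out : Int) : Decidable (Spec_maxValueOfCoins2 piles k out) := by unfold Spec_maxValueOfCoins2; infer_instance

-- ===== CLAIM (what is proved, stated in full; the proofs are below) =====
def Claim_equal_maxValueOfCoins2 : Prop := ∀ (piles : List (List Int)) (k : Int), Dom_maxValueOfCoins2 piles k → Pre_maxValueOfCoins2 piles k → Spec_maxValueOfCoins2 piles k (maxValueOfCoins2 piles k)

-- ===== LEMMAS AND PROOFS =====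

-- the mathematical value both programs compute: pvSpec l b = best total from the
-- pile suffix l with coin budget b (j capped at min(b, pile length))
def pvMax (pile : List Int) (f : Int → Int) (b : Int) : Nat → Int
  | 0 => f b
  | t + 1 => max (pvMax pile f b t) ((pile.take (t + 1)).sum + f (b - ((t : Int) + 1)))

def pvSpec : List (List Int) → Int → Int
  | [], _ => 0
  | pile :: rest, b => pvMax pile (pvSpec rest) b (min b (pile.length : Int)).toNat

-- memo validity: every entry (i, b) ↦ v stores pvSpec of the i-th suffix at b
def pvValid (piles : List (List Int)) (memo : PySem.Dict (Int × Int) Int) : Prop :=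
  ∀ i b v, memo.get? (i, b) = some v → v = pvSpec (piles.drop i.toNat) b

-- A's per-pile update, named for the proofs
def pvFA (k : Int) (dp pile : List Int) : List Int :=
  (PySem.List.pyRange 1 (k + 1) 1).foldl
    (fun newDp coins =>
      let r := pvInnerA pile dp coins
      PySem.List.pySetD newDp r.1 r.2.2) dp

-- A's dp invariant after processing suffix l
def pvInv (k : Int) (dp : List Int) (l : List (List Int)) : Prop :=
  dp.length = (k + 1).toNat ∧ ∀ n : Nat, n ≤ k.toNat → dp.getD n 0 = pvSpec l (n : Int)

theorem pv_portA_eq (piles : List (List Int)) (k : Int) :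
    maxValueOfCoins2 piles k = PySem.List.pyGetD
      ((PySem.List.pyRange ((PySem.List.len piles) - 1) (-1) (-1)).foldl
        (fun dp i => pvFA k dp (PySem.List.pyGetD piles i []))
        (PySem.List.pyRepeat [0] (k + 1))) k 0 := rfl

-- the countdown outer loop over indices is the foldl over the reversed list
theorem pv_countdown {β : Type} (f : β → List Int → β) :
    ∀ (piles : List (List Int)) (b : β),
      (PySem.List.pyRange ((piles.length : Int) - 1) (-1) (-1)).foldl
        (fun acc i => f acc (PySem.List.pyGetD piles i [])) b
      = piles.reverse.foldl f b := by
  intro piles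
  induction piles using List.reverseRecOn with
  | nil => intro b; simp [PySem.List.pyRange_neg_one_eq_nil]
  | append_singleton xs x ih =>
    intro b
    have h1 : ((xs ++ [x]).length : Int) - 1 = (xs.length : Int) := by simp
    rw [h1, PySem.List.pyRange_neg_one_cons (by omega), List.foldl_cons]
    have h2 : PySem.List.pyGetD (xs ++ [x]) ((xs.length : Int)) [] = x := by
      simp [List.getD_eq_getElem?_getD]
    rw [h2]
    have hcg : ∀ (acc : β), ∀ i ∈ PySem.List.pyRange ((xs.length : Int) - 1) (-1) (-1),
        f acc (PySem.List.pyGetD (xs ++ [x]) i []) = f acc (PySem.List.pyGetD xs i []) := by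
      intro acc i hi
      rw [PySem.List.pyRange_neg_one] at hi
      simp only [List.mem_map, List.mem_range] at hi
      obtain ⟨kk, hk, rfl⟩ := hi
      have h0 : (0:Int) ≤ (xs.length : Int) - 1 - kk := by omega
      have hlt : (xs.length : Int) - 1 - kk < (xs.length : Int) := by omega
      rw [PySem.List.pyGetD_eq_getElem _ _ h0 (by simp; omega),
          PySem.List.pyGetD_eq_getElem _ _ h0 hlt]
      congr 1
      exact List.getElem_append_left (by omega)
    rw [PySem.List.foldl_congr_mem _ _ _ _ hcg, ih]
    simp

-- value of the j-coins-from-this-pile candidate in A's inner loop, budget c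
def pvCand (pile dp : List Int) (c : Int) (j : Nat) : Int :=
  (pile.take j).sum + PySem.List.pyGetD dp (c - (j : Int)) 0

-- running max of A's inner-loop candidates j = 0..t (j = 0 gives dp[c])
def pvM (pile dp : List Int) (c : Int) : Nat → Int
  | 0 => PySem.List.pyGetD dp c 0
  | t + 1 => max (pvM pile dp c t) (pvCand pile dp c (t + 1))

-- characterization of A's inner loop: state after j = 1..t
theorem pv_innerA_spec (pile dp : List Int) (c : Int) :
    ∀ t : Nat,
      (PySem.List.pyRange 1 ((t : Int) + 1) 1).foldl
        (fun s j =>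
          let curAmt := if j ≤ PySem.List.len pile then s.2.1 + PySem.List.pyGetD pile (j - 1) 0 else s.2.1
          (j, curAmt, max s.2.2 (curAmt + PySem.List.pyGetD dp (c - j) 0)))
        (0, 0, PySem.List.pyGetD dp c 0)
      = (if t = 0 then 0 else (t : Int), (pile.take t).sum, pvM pile dp c t) := by
  intro t
  induction t with
  | zero => simp [PySem.List.pyRange_one_eq_nil (by omega : (1:Int) ≤ 1), pvM]
  | succ t ih =>
    have hc : ((t + 1 : Nat) : Int) + 1 = ((t : Int) + 1) + 1 := by push_cast; ring
    rw [hc, PySem.List.pyRange_one_succ_right (by omega), List.foldl_append, ih, List.foldl_cons,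
        List.foldl_nil]
    have hsum : (if ((t : Int) + 1) ≤ PySem.List.len pile
        then (pile.take t).sum + PySem.List.pyGetD pile ((t : Int) + 1 - 1) 0
        else (pile.take t).sum) = (pile.take (t + 1)).sum := by
      rw [PySem.List.len_eq]
      by_cases h : t < pile.length
      · rw [if_pos (by omega)]
        have : (t : Int) + 1 - 1 = ((t : Nat) : Int) := by ring
        rw [this, PySem.List.pyGetD_natCast, List.getD_eq_getElem _ _ h, List.sum_take_succ _ _ h]
      · rw [if_neg (by omega), List.take_of_length_le (by omega), List.take_of_length_le (by omega)]
    simp only []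
    rw [hsum]
    have hlast : (List.take (t + 1) pile).sum + PySem.List.pyGetD dp (c - ((t:Int) + 1)) 0 = pvCand pile dp c (t + 1) := by
      rw [pvCand]; norm_cast
    rw [hlast]
    simp [pvM]

theorem pv_innerA_eq (pile dp : List Int) (c : Int) (hc : 1 ≤ c) :
    pvInnerA pile dp c = (c, (pile.take c.toNat).sum, pvM pile dp c c.toNat) := by
  rw [pvInnerA]
  have hc' : c + 1 = ((c.toNat : Nat) : Int) + 1 := by omega
  rw [hc', pv_innerA_spec]
  rw [if_neg (by omega)]
  congr 1
  omega

-- the fold that writes newDp[coins] for coins = 1..t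
theorem pv_setfold (val : Int → Int) :
    ∀ (t : Nat) (xs : List Int),
      ((PySem.List.pyRange 1 ((t : Int) + 1) 1).foldl
        (fun nd c => PySem.List.pySetD nd c (val c)) xs).length = xs.length ∧
      (t < xs.length →
      ∀ n : Nat, ((PySem.List.pyRange 1 ((t : Int) + 1) 1).foldl
        (fun nd c => PySem.List.pySetD nd c (val c)) xs).getD n 0
        = if 1 ≤ n ∧ n ≤ t then val (n : Int) else xs.getD n 0) := by
  intro t
  induction t with
  | zero =>
    intro xs
    rw [PySem.List.pyRange_one_eq_nil (by omega : ((0:Nat):Int) + 1 ≤ 1)]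
    refine ⟨rfl, fun _ n => ?_⟩
    simp
    omega
  | succ t ih =>
    intro xs
    have hc : ((t + 1 : Nat) : Int) + 1 = ((t : Int) + 1) + 1 := by push_cast; ring
    rw [hc, PySem.List.pyRange_one_succ_right (by omega), List.foldl_append, List.foldl_cons,
        List.foldl_nil]
    obtain ⟨ihl, ihg⟩ := ih xs
    rw [PySem.List.pySetD_of_nonneg _ _ (by omega : (0:Int) ≤ (t : Int) + 1)]
    have hcast : ((t : Int) + 1).toNat = t + 1 := by omega
    rw [hcast]
    refine ⟨by rw [List.length_set, ihl], fun hlt n => ?_⟩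
    rw [List.getD_eq_getElem?_getD, List.getElem?_set, ihl]
    by_cases hn : t + 1 = n
    · subst hn
      rw [if_pos rfl, if_pos (by omega : t + 1 < xs.length), if_pos (by omega)]
      rfl
    · rw [if_neg hn, ← List.getD_eq_getElem?_getD, ihg (by omega) n]
      by_cases h1 : 1 ≤ n ∧ n ≤ t
      · rw [if_pos h1, if_pos (by omega)]
      · rw [if_neg h1, if_neg (by omega)]

-- pvMax is monotone in the number of candidates
theorem pvMax_mono_t (pile : List Int) (f : Int → Int) (b : Int) :
    ∀ s t : Nat, s ≤ t → pvMax pile f b s ≤ pvMax pile f b t := by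
  intro s t hst
  induction t, hst using Nat.le_induction with
  | base => exact le_refl _
  | succ n hn ih => exact le_trans ih (le_max_left _ _)

-- pvSpec is monotone in the budget (on nonnegative budgets)
theorem pvSpec_mono : ∀ (l : List (List Int)) (a b : Int), 0 ≤ a → a ≤ b →
    pvSpec l a ≤ pvSpec l b := by
  intro l
  induction l with
  | nil => intro a b _ _; exact le_refl _
  | cons pile rest ih =>
    intro a b ha hab
    show pvMax pile (pvSpec rest) a (min a (pile.length : Int)).toNat
        ≤ pvMax pile (pvSpec rest) b (min b (pile.length : Int)).toNat
    have hstep : ∀ t : Nat, (t : Int) ≤ min a (pile.length : Int) →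
        pvMax pile (pvSpec rest) a t ≤ pvMax pile (pvSpec rest) b t := by
      intro t
      induction t with
      | zero => intro _; exact ih a b ha hab
      | succ t iht =>
        intro ht
        have ht' : ((t : Int) + 1) ≤ min a (pile.length : Int) := by push_cast at ht ⊢; omega
        apply max_le_max (iht (by push_cast at ht ⊢; omega))
        exact add_le_add (le_refl _) (ih _ _ (by omega) (by omega))
    calc pvMax pile (pvSpec rest) a (min a (pile.length : Int)).toNat
        ≤ pvMax pile (pvSpec rest) b (min a (pile.length : Int)).toNat :=
          hstep _ (by omega)
      _ ≤ pvMax pile (pvSpec rest) b (min b (pile.length : Int)).toNat :=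
          pvMax_mono_t _ _ _ _ _ (by omega)

-- capping the candidate count at min(c, len pile) is exact for a monotone f
theorem pvMax_cap (pile : List Int) (f : Int → Int)
    (hm : ∀ a b : Int, 0 ≤ a → a ≤ b → f a ≤ f b) (c : Int) (_hc : 0 ≤ c) :
    pvMax pile f c c.toNat = pvMax pile f c (min c.toNat pile.length) := by
  have key : ∀ t : Nat, min c.toNat pile.length ≤ t → t ≤ c.toNat →
      pvMax pile f c t = pvMax pile f c (min c.toNat pile.length) := by
    intro t hut
    induction t, hut using Nat.le_induction with
    | base => intro _; rfl
    | succ n hn ih =>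
      intro hnc
      have hm' : pile.length ≤ n ∧ pile.length < c.toNat := by omega
      rw [pvMax, ih (by omega), max_eq_left]
      have hsum : (pile.take (n + 1)).sum = (pile.take pile.length).sum := by
        rw [List.take_of_length_le (by omega), List.take_length]
      rcases Nat.eq_zero_or_pos pile.length with h0 | hpos
      · -- empty pile: the dropped candidate is at most f c = pvMax 0
        have hnil : pile = [] := List.eq_nil_of_length_eq_zero h0
        have hle : (pile.take (n + 1)).sum + f (c - ((n : Int) + 1)) ≤ f c := by
          rw [hnil]
          simp only [List.take_nil, List.sum_nil, zero_add]
          exact hm _ _ (by omega) (by omega)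
        calc (pile.take (n + 1)).sum + f (c - ((n : Int) + 1)) ≤ f c := hle
          _ ≤ pvMax pile f c (min c.toNat pile.length) := by
              have := pvMax_mono_t pile f c 0 (min c.toNat pile.length) (by omega)
              simpa [pvMax] using this
      · -- nonempty pile: dominated by the j = len(pile) candidate, which is inside
        have hmm : min c.toNat pile.length = pile.length := by omega
        rw [hmm]
        obtain ⟨m', hm'eq⟩ : ∃ m', pile.length = m' + 1 := ⟨pile.length - 1, by omega⟩
        have hdp : f (c - ((n : Int) + 1)) ≤ f (c - (pile.length : Int)) :=
          hm _ _ (by omega) (by omega)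
        calc (pile.take (n + 1)).sum + f (c - ((n : Int) + 1))
            ≤ (pile.take pile.length).sum + f (c - (pile.length : Int)) := by
              rw [hsum]; exact add_le_add (le_refl _) hdp
          _ ≤ pvMax pile f c pile.length := by
              rw [hm'eq, pvMax]
              have hcast : ((m' : Int) + 1) = ((pile.length : Nat) : Int) := by
                rw [hm'eq]; push_cast; ring
              rw [← hm'eq]
              exact le_trans (le_of_eq (by rw [hm'eq]; push_cast; ring_nf)) (le_max_right _ _)
  exact key c.toNat (by omega) (le_refl _)

-- A's inner-loop maximum equals the pvMax form under the dp invariant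
theorem pvM_eq_pvMax (k : Int) (dp : List Int) (l : List (List Int)) (pile : List Int)
    (hinv : pvInv k dp l) (n : Nat) (hn : n ≤ k.toNat) :
    ∀ t : Nat, t ≤ n → pvM pile dp ((n : Nat) : Int) t = pvMax pile (pvSpec l) ((n : Nat) : Int) t := by
  obtain ⟨hlen, hget⟩ := hinv
  intro t
  induction t with
  | zero =>
    intro _
    show PySem.List.pyGetD dp ((n : Nat) : Int) 0 = pvSpec l ((n : Nat) : Int)
    rw [PySem.List.pyGetD_natCast, hget n hn]
  | succ t ih =>
    intro ht
    rw [pvM, pvMax, ih (by omega), pvCand]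
    congr 1
    have hcast : ((n : Nat) : Int) - ((t + 1 : Nat) : Int) = ((n - (t + 1) : Nat) : Int) := by
      push_cast; omega
    have hcast2 : ((n : Nat) : Int) - ((t : Int) + 1) = ((n - (t + 1) : Nat) : Int) := by
      omega
    rw [hcast, PySem.List.pyGetD_natCast, hget _ (by omega), ← hcast2]

-- one pile step of A preserves the invariant, moving to the longer suffix
theorem pv_stepA (k : Int) (hk : 0 ≤ k) (dp : List Int) (l : List (List Int)) (pile : List Int)
    (hinv : pvInv k dp l) : pvInv k (pvFA k dp pile) (pile :: l) := by
  obtain ⟨hlen, hget⟩ := hinv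
  have hbound : k + 1 = ((k.toNat : Nat) : Int) + 1 := by omega
  have hsf := pv_setfold (fun c => (pvInnerA pile dp c).2.2) k.toNat dp
  obtain ⟨hl, hg⟩ := hsf
  have hfa : pvFA k dp pile = (PySem.List.pyRange 1 ((k.toNat : Int) + 1) 1).foldl
      (fun nd c => PySem.List.pySetD nd c ((pvInnerA pile dp c).2.2)) dp := by
    rw [pvFA, hbound]
    apply PySem.List.foldl_congr_mem
    intro acc c hc
    rw [PySem.List.mem_pyRange_one] at hc
    simp only []
    rw [pv_innerA_eq pile dp c (by omega)]
  have hkl : k.toNat < dp.length := by omega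
  have hg := hg hkl
  constructor
  · rw [hfa, hl, hlen]
  · intro n hn
    rw [hfa, hg n]
    by_cases h0 : n = 0
    · subst h0
      rw [if_neg (by omega), hget 0 (by omega)]
      show pvSpec l 0 = pvSpec (pile :: l) ((0 : Nat) : Int)
      show pvSpec l 0 = pvMax pile (pvSpec l) ((0 : Nat) : Int) (min ((0:Nat) : Int) (pile.length : Int)).toNat
      have : (min ((0:Nat) : Int) (pile.length : Int)).toNat = 0 := by omega
      rw [this]
      simp [pvMax]
    · rw [if_pos (by omega)]
      rw [pv_innerA_eq pile dp (n : Int) (by omega)]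
      show pvM pile dp (n : Int) ((n : Int)).toNat = pvSpec (pile :: l) ((n : Nat) : Int)
      have htn : ((n : Int)).toNat = n := by omega
      rw [htn]
      rw [pvM_eq_pvMax k dp l pile ⟨hlen, hget⟩ n hn n (le_refl _)]
      show pvMax pile (pvSpec l) (n : Int) n = pvMax pile (pvSpec l) ((n : Nat) : Int) (min ((n : Nat) : Int) (pile.length : Int)).toNat
      have hmin : (min ((n : Nat) : Int) (pile.length : Int)).toNat = min n pile.length := by omega
      rw [hmin, ← htn]
      exact pvMax_cap pile (pvSpec l) (fun a b ha hab => pvSpec_mono l a b ha hab) (n : Int) (by omega)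

-- folding A's update over a list of piles keeps the invariant
theorem pv_foldA (k : Int) (hk : 0 ≤ k) :
    ∀ (q : List (List Int)) (dp : List Int) (l : List (List Int)),
      pvInv k dp l → pvInv k (q.foldl (pvFA k) dp) (q.reverse ++ l) := by
  intro q
  induction q with
  | nil => intro dp l h; simpa using h
  | cons pile q ih =>
    intro dp l h
    have h1 := pv_stepA k hk dp l pile h
    have h2 := ih (pvFA k dp pile) (pile :: l) h1
    simpa using h2

-- a toNat-normalized upper bound for the capped range
theorem pv_range_toNat (m : Int) :
    PySem.List.pyRange 1 (m + 1) 1 = PySem.List.pyRange 1 (((m.toNat : Nat) : Int) + 1) 1 := by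
  by_cases h : 0 ≤ m
  · rw [Int.toNat_of_nonneg h]
  · rw [PySem.List.pyRange_one_eq_nil (by omega), PySem.List.pyRange_one_eq_nil (by omega)]

-- the memo-free shape of B's inner loop: running (s, res) over j = 1..t
theorem pv_purefold (pile : List Int) (f : Int → Int) (b : Int) :
    ∀ t : Nat, t ≤ pile.length →
      ((PySem.List.pyRange 1 ((t : Int) + 1) 1).foldl
        (fun (p : Int × Int) j =>
          (p.1 + PySem.List.pyGetD pile (j - 1) 0,
           max p.2 ((p.1 + PySem.List.pyGetD pile (j - 1) 0) + f (b - j)))) ((0 : Int), f b))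
      = ((pile.take t).sum, pvMax pile f b t) := by
  intro t
  induction t with
  | zero =>
    intro _
    rw [PySem.List.pyRange_one_eq_nil (by omega : ((0:Nat):Int) + 1 ≤ 1)]
    simp [pvMax]
  | succ t ih =>
    intro ht
    have hc : ((t + 1 : Nat) : Int) + 1 = ((t : Int) + 1) + 1 := by push_cast; ring
    rw [hc, PySem.List.pyRange_one_succ_right (by omega), List.foldl_append, ih (by omega),
        List.foldl_cons, List.foldl_nil]
    have hsum : (pile.take t).sum + PySem.List.pyGetD pile ((t : Int) + 1 - 1) 0
        = (pile.take (t + 1)).sum := by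
      have h1 : (t : Int) + 1 - 1 = ((t : Nat) : Int) := by ring
      rw [h1, PySem.List.pyGetD_natCast, List.getD_eq_getElem _ _ (by omega),
          List.sum_take_succ _ _ (by omega)]
    simp only []
    rw [hsum, pvMax]

-- correctness of the memoized recursion: it computes pvSpec and keeps the memo valid
theorem pvBest_spec (piles : List (List Int)) :
    ∀ (rest : List (List Int)) (i b : Int) (memo : PySem.Dict (Int × Int) Int),
      0 ≤ i → rest = piles.drop i.toNat → pvValid piles memo →
      (pvBest rest i b memo).1 = pvSpec rest b ∧ pvValid piles (pvBest rest i b memo).2 := by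
  intro rest
  induction rest with
  | nil =>
    intro i b memo _ _ hv
    exact ⟨by simp [pvBest, pvSpec], by simpa [pvBest] using hv⟩
  | cons pile rest ih =>
    intro i b memo hi hdrop hv
    have hi1t : (i + 1).toNat = i.toNat + 1 := by omega
    have hdrop1 : rest = piles.drop (i + 1).toNat := by
      rw [hi1t]
      have : piles.drop (i.toNat + 1) = (piles.drop i.toNat).drop 1 := by
        rw [List.drop_drop]
      rw [this, ← hdrop, List.drop_one, List.tail_cons]
    -- the loop, with all recursive calls replaced by pvSpec rest
    have hloop : ∀ (js : List Int) (s res : Int) (memo' : PySem.Dict (Int × Int) Int),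
        pvValid piles memo' →
        (pvLoop rest (i + 1) pile b js s res memo').1
          = (js.foldl (fun (p : Int × Int) j =>
              (p.1 + PySem.List.pyGetD pile (j - 1) 0,
               max p.2 ((p.1 + PySem.List.pyGetD pile (j - 1) 0) + pvSpec rest (b - j)))) (s, res)).2
        ∧ pvValid piles (pvLoop rest (i + 1) pile b js s res memo').2 := by
      intro js
      induction js with
      | nil => intro s res memo' hv'; exact ⟨by simp [pvLoop], by simpa [pvLoop] using hv'⟩
      | cons j js ihj =>
        intro s res memo' hv'
        rw [pvLoop]
        obtain ⟨hb1, hb2⟩ := ih (i + 1) (b - j) memo' (by omega) hdrop1 hv'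
        simp only [List.foldl_cons]
        rw [← hb1]
        exact ihj _ _ _ hb2
    rw [pvBest]
    cases hmemo : memo.get? (i, b) with
    | some v =>
      refine ⟨?_, hv⟩
      have := hv i b v hmemo
      rw [this, ← hdrop]
    | none =>
      obtain ⟨hp1, hp2⟩ := ih (i + 1) b memo (by omega) hdrop1 hv
      simp only []
      obtain ⟨hq1, hq2⟩ :=
        hloop (PySem.List.pyRange 1 (min b (PySem.List.len pile) + 1) 1) 0
          (pvBest rest (i + 1) b memo).1 (pvBest rest (i + 1) b memo).2 hp2
      have hval : (pvLoop rest (i + 1) pile b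
          (PySem.List.pyRange 1 (min b (PySem.List.len pile) + 1) 1) 0
          (pvBest rest (i + 1) b memo).1 (pvBest rest (i + 1) b memo).2).1
          = pvSpec (pile :: rest) b := by
        rw [hq1, hp1, PySem.List.len_eq, pv_range_toNat (min b (pile.length : Int))]
        have ht : (min b (pile.length : Int)).toNat ≤ pile.length := by omega
        rw [pv_purefold pile (pvSpec rest) b _ ht]
        simp [pvSpec]
      refine ⟨hval, ?_⟩
      intro i' b' v hv'
      rw [PySem.Dict.get?_insert] at hv'
      by_cases he : (i', b') = (i, b)
      · rw [if_pos he] at hv'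
        obtain ⟨rfl⟩ := he
        cases hv'
        rw [hval, ← hdrop]
      · rw [if_neg he] at hv'
        exact hq2 i' b' v hv'

-- ===== VERDICT (by name: the statement is the Claim_ definition above) =====
theorem maxValueOfCoins2_spec : Claim_equal_maxValueOfCoins2 := by
  intro piles k _ hpre
  unfold Pre_maxValueOfCoins2 at hpre
  unfold Spec_maxValueOfCoins2
  rw [pv_portA_eq, PySem.List.len_eq, pv_countdown (pvFA k) piles]
  have hinv0 : pvInv k (PySem.List.pyRepeat [0] (k + 1)) [] := by
    rw [PySem.List.pyRepeat_singleton]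
    constructor
    · simp
    · intro n hn
      rw [List.getD_eq_getElem _ _ (by simp; omega)]
      simp [pvSpec]
  have hA := pv_foldA k hpre piles.reverse (PySem.List.pyRepeat [0] (k + 1)) [] hinv0
  rw [List.reverse_reverse, List.append_nil] at hA
  obtain ⟨hlen, hget⟩ := hA
  have hB := pvBest_spec piles piles 0 k PySem.Dict.empty (le_refl 0) (by simp)
    (fun i b v h => by simp [PySem.Dict.get?_empty] at h)
  unfold maxValueOfCoins2_alt
  rw [hB.1]
  have hk : k = ((k.toNat : Nat) : Int) := by omega
  revert hget
  generalize (List.foldl (pvFA k) (PySem.List.pyRepeat [0] (k + 1)) piles.reverse) = dp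
  intro hget
  rw [hk, PySem.List.pyGetD_natCast]
  exact hget k.toNat (le_refl _)
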